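-- pv_equiv track=rewrite | github.com/fact-project/pyfact | fact/dim/rpcproxy.py | convert
-- ===== SOURCE A (Python) =====
-- def convert(args):
--     ret = ""
--     if not hasattr(args, '__iter__'):
--         args = (args,)
--     for x in args:
--         add = str(x)
--         add = add.replace('/', '\/')
--         add = add.replace('=', '\=')
--         add = add.replace(',', '\,')
--         ret += add + ','
--     return ret[:-1]
-- ===== SOURCE B (Python) =====
-- def convert(args):
--     if not hasattr(args, '__iter__'):
--         args = (args,)
--     special = {'/', '=', ','}
--     escaped = []
--     for x in args:
--         buf = []
--         for c in str(x):
--             if c in special: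
--                 buf.append('\\')
--             buf.append(c)
--         escaped.append(''.join(buf))
--     return ','.join(escaped)
-- ===== Notes on version B (the rewrite author's own statement) =====
-- stated objective: idiomatic
-- what changed: Replaces the three whole-string .replace passes plus manual accumulation with trailing-comma stripping by a single per-character escaping pass over each argument and a ','.join of the escaped pieces.
import Mathlib
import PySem

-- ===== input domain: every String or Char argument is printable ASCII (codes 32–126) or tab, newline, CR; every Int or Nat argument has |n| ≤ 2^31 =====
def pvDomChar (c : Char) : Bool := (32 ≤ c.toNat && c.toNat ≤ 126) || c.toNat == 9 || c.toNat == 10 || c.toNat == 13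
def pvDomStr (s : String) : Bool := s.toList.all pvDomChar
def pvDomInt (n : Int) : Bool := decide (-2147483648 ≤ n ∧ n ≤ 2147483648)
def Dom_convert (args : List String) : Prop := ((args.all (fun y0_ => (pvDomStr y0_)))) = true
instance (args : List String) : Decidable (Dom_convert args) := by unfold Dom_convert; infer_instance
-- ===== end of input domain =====

-- B escapes each argument in a single per-character pass and uses ','.join instead of
-- three whole-string replace passes plus manual accumulation with trailing-comma stripping.
-- (With args : List String, Python's hasattr(args,'__iter__') guard is always true and drops out.)

-- ===== PORT A =====
-- add.replace('/','\/').replace('=','\=').replace(',','\,')  (on code points)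
def pvEscA (cs : List Char) : List Char :=
  PySem.Chars.replace (PySem.Chars.replace (PySem.Chars.replace cs ['/'] ['\\', '/'])
    ['='] ['\\', '=']) [','] ['\\', ',']

def convert (args : List String) : String :=
  String.mk (PySem.List.slice
    (args.foldl (fun ret x => ret ++ pvEscA x.toList ++ [',']) []) none (some (-1)))

-- ===== PORT B =====
def pvSpecial : List Char := ['/', '=', ',']

-- per-character buffer loop: backslash before any special character, then the character
def pvEscB (cs : List Char) : List Char :=
  cs.foldl (fun buf c => if c ∈ pvSpecial then buf ++ ['\\', c] else buf ++ [c]) []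

def convert_alt (args : List String) : String :=
  String.mk (PySem.Chars.join [','] (args.map (fun x => pvEscB x.toList)))

-- ===== PRECONDITION & SPEC =====
def Spec_convert (args : List String) (out : String) : Prop := out = convert_alt args
instance (args : List String) (out : String) : Decidable (Spec_convert args out) := by unfold Spec_convert; infer_instance

-- ===== CLAIM (what is proved, stated in full; the proofs are below) =====
def Claim_equal_convert : Prop := ∀ (args : List String), Dom_convert args → Spec_convert args (convert args)

-- ===== LEMMAS AND PROOFS =====

-- single-character replace is a flatMap over the characters
theorem replace_go_single (a : Char) (r : List Char) :
    ∀ (l : List Char) (fuel : Nat) (acc : List Char), l.length ≤ fuel →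
      PySem.Chars.replace.go [a] r fuel l acc =
        acc.reverse ++ l.flatMap (fun c => if c = a then r else [c]) := by
  intro l
  induction l with
  | nil =>
      intro fuel acc _
      cases fuel <;> simp [PySem.Chars.replace.go]
  | cons c t ih =>
      intro fuel acc hle
      cases fuel with
      | zero => simp at hle
      | succ f =>
          by_cases hca : c = a
          · subst hca
            have hpre : List.isPrefixOf [c] (c :: t) = true := by
              simp [List.isPrefixOf]
            simp only [PySem.Chars.replace.go, hpre, if_true, List.length_cons,
              List.length_nil, List.drop_succ_cons, List.drop_zero]
            rw [ih f (r.reverse ++ acc) (by simpa using Nat.lt_succ_iff.mp (Nat.lt_of_lt_of_le (Nat.lt_succ_self _) (by simpa using hle)))]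
            simp
          · have hpre : List.isPrefixOf [a] (c :: t) = false := by
              simp [List.isPrefixOf]
              intro h; exact absurd h.symm hca
            simp only [PySem.Chars.replace.go, hpre]
            rw [ih f (c :: acc) (by simpa using Nat.succ_le_succ_iff.mp hle)]
            simp [hca]

theorem replace_single (a : Char) (r : List Char) (s : List Char) :
    PySem.Chars.replace s [a] r = s.flatMap (fun c => if c = a then r else [c]) := by
  simp only [PySem.Chars.replace, List.isEmpty_cons, Bool.false_eq_true, if_false]
  simpa using replace_go_single a r s s.length [] le_rfl

-- the per-character escape both programs compute
def pvEscChar (c : Char) : List Char := if c ∈ pvSpecial then ['\\', c] else [c]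

theorem escA_eq_flatMap (cs : List Char) : pvEscA cs = cs.flatMap pvEscChar := by
  unfold pvEscA
  rw [replace_single, replace_single, replace_single, List.flatMap_assoc, List.flatMap_assoc]
  refine List.flatMap_congr (fun c _ => ?_)
  by_cases h1 : c = '/'
  · subst h1; decide
  · by_cases h2 : c = '='
    · subst h2; decide
    · by_cases h3 : c = ','
      · subst h3; decide
      · simp [h1, h2, h3, pvEscChar, pvSpecial]

theorem escB_eq_flatMap (cs : List Char) : pvEscB cs = cs.flatMap pvEscChar := by
  unfold pvEscB
  have : ∀ acc, cs.foldl (fun buf c => if c ∈ pvSpecial then buf ++ ['\\', c] else buf ++ [c]) acc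
      = acc ++ cs.flatMap pvEscChar := by
    induction cs with
    | nil => intro acc; simp
    | cons c t ih =>
        intro acc
        by_cases h : c ∈ pvSpecial <;>
          simp [List.foldl_cons, h, ih, pvEscChar, List.append_assoc]
  simpa using this []

-- trailing-comma accumulation, after dropping the last character, is the ','-join
theorem dropLast_flatMap_comma (es : List (List Char)) :
    (es.flatMap (fun e => e ++ [','])).dropLast = List.intercalate [','] es := by
  induction es with
  | nil => simp [List.intercalate]
  | cons e es ih =>
      cases es with
      | nil => simp [List.intercalate]
      | cons e' es' =>
          have hne : ((e' :: es').flatMap (fun e => e ++ [','])) ≠ [] := by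
            simp [List.flatMap_cons]
          rw [List.flatMap_cons, List.dropLast_append_of_ne_nil hne, ih]
          simp [List.intercalate, List.intersperse, List.append_assoc]

theorem convert_lists (args : List String) :
    PySem.List.slice (args.foldl (fun ret x => ret ++ pvEscA x.toList ++ [',']) []) none (some (-1))
      = PySem.Chars.join [','] (args.map (fun x => pvEscB x.toList)) := by
  rw [PySem.List.slice_to_neg_one]
  have hfold : ∀ acc, args.foldl (fun ret x => ret ++ pvEscA x.toList ++ [',']) acc
      = acc ++ args.flatMap (fun x => pvEscA x.toList ++ [',']) := by
    induction args with
    | nil => intro acc; simp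
    | cons x t ih =>
        intro acc
        rw [List.foldl_cons, ih, List.flatMap_cons]
        simp [List.append_assoc]
  rw [hfold []]
  simp only [List.nil_append]
  have : args.flatMap (fun x => pvEscA x.toList ++ [','])
      = (args.map (fun x => pvEscB x.toList)).flatMap (fun e => e ++ [',']) := by
    rw [List.flatMap_map]
    exact List.flatMap_congr (fun x _ => by rw [escA_eq_flatMap, ← escB_eq_flatMap])
  rw [this, dropLast_flatMap_comma]
  rfl

-- ===== VERDICT (by name: the statement is the Claim_ definition above) =====
theorem convert_spec : Claim_equal_convert := by
  intro args _
  unfold Spec_convert convert convert_alt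
  rw [convert_lists]
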